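-- pv_equiv track=rewrite | github.com/Cklaus1/Deepscript | deepscript/core/speaker_intelligence.py | _match_label_to_cluster
-- ===== SOURCE A (Python) =====
-- def _match_label_to_cluster(label: str, resolved: list[dict]) -> str | None:
--     """Match an LLM speaker label to a cluster_id from diarization resolution."""
--     # Direct match on local_label
--     for sr in resolved:
--         if sr.get("local_label") == label:
--             return sr.get("speaker_cluster_id")
--     # Match on cluster_id (label might already be a cluster_id)
--     for sr in resolved:
--         if sr.get("speaker_cluster_id") == label:
--             return label
--     # Match on display_name
--     for sr in resolved:
--         if sr.get("display_name") == label: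
--             return sr.get("speaker_cluster_id")
--     return None
-- ===== SOURCE B (Python) =====
-- def _match_label_to_cluster(label: str, resolved: list[dict]) -> str | None:
--     """Single pass: build first-occurrence indexes, then do the priority lookups."""
--     local_map = {}
--     cluster_ids = set()
--     display_map = {}
--     for sr in resolved:
--         ll = sr.get("local_label")
--         cid = sr.get("speaker_cluster_id")
--         dn = sr.get("display_name")
--         if ll is not None and ll not in local_map:
--             local_map[ll] = cid
--         if cid is not None:
--             cluster_ids.add(cid)
--         if dn is not None and dn not in display_map:
--             display_map[dn] = cid
--     if label in local_map:
--         return local_map[label]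
--     if label in cluster_ids:
--         return label
--     if label in display_map:
--         return display_map[label]
--     return None
-- ===== Notes on version B (the rewrite author's own statement) =====
-- stated objective: alternative
-- what changed: Replaces A's three sequential scans of `resolved` with a single pass that builds first-occurrence lookup indexes (local_label map, cluster_id set, display_name map) followed by three O(1)-style lookups in priority order.
import Mathlib
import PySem

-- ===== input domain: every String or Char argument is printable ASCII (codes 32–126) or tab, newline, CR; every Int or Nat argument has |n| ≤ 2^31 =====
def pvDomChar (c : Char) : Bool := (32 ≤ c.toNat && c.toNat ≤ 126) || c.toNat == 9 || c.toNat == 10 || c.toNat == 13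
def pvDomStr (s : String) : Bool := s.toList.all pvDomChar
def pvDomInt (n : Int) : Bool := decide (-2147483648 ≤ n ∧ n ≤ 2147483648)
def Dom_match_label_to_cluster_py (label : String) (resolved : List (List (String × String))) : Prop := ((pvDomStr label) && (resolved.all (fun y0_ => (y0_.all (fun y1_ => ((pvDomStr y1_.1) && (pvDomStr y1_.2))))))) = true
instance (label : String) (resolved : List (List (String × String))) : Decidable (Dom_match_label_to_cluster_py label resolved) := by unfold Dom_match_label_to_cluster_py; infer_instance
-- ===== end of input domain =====

-- B is a single pass over `resolved` building first-occurrence indexes, instead of A's three scans; objective: alternative decomposition (same asymptotic cost).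

-- ===== PORT A =====
-- first loop of A: first sr with sr.get("local_label") == label, returning sr.get("speaker_cluster_id")
def aLoop1 (label : String) : List (List (String × String)) → Option (Option String)
  | [] => none
  | sr :: rest =>
    if (PySem.Dict.mk sr).get? "local_label" = some label then
      some ((PySem.Dict.mk sr).get? "speaker_cluster_id")
    else aLoop1 label rest

-- second loop of A: first sr with sr.get("speaker_cluster_id") == label, returning label
def aLoop2 (label : String) : List (List (String × String)) → Option (Option String)
  | [] => none
  | sr :: rest =>
    if (PySem.Dict.mk sr).get? "speaker_cluster_id" = some label then
      some (some label)
    else aLoop2 label rest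

-- third loop of A: first sr with sr.get("display_name") == label, returning sr.get("speaker_cluster_id")
def aLoop3 (label : String) : List (List (String × String)) → Option (Option String)
  | [] => none
  | sr :: rest =>
    if (PySem.Dict.mk sr).get? "display_name" = some label then
      some ((PySem.Dict.mk sr).get? "speaker_cluster_id")
    else aLoop3 label rest

def match_label_to_cluster_py (label : String) (resolved : List (List (String × String))) : Option String :=
  match aLoop1 label resolved with
  | some r => r
  | none =>
    match aLoop2 label resolved with
    | some r => r
    | none =>
      match aLoop3 label resolved with
      | some r => r
      | none => none

-- ===== PORT B =====
-- one step of B's single building pass: update (local_map, cluster_ids, display_map) with one sr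
def bStep (acc : PySem.Dict String (Option String) × PySem.Set String × PySem.Dict String (Option String))
    (sr : List (String × String)) :
    PySem.Dict String (Option String) × PySem.Set String × PySem.Dict String (Option String) :=
  let d := PySem.Dict.mk sr
  let cid := d.get? "speaker_cluster_id"
  let lm := match d.get? "local_label" with
    | some ll => if acc.1.contains ll then acc.1 else acc.1.insert ll cid
    | none => acc.1
  let cs := match cid with
    | some c => PySem.Set.add acc.2.1 c
    | none => acc.2.1
  let dm := match d.get? "display_name" with
    | some dn => if acc.2.2.contains dn then acc.2.2 else acc.2.2.insert dn cid
    | none => acc.2.2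
  (lm, cs, dm)

def match_label_to_cluster_py_alt (label : String) (resolved : List (List (String × String))) : Option String :=
  let acc := resolved.foldl bStep (PySem.Dict.empty, PySem.Set.empty, PySem.Dict.empty)
  match acc.1.get? label with
  | some r => r
  | none =>
    if PySem.Set.contains acc.2.1 label then some label
    else
      match acc.2.2.get? label with
      | some r => r
      | none => none

-- ===== PRECONDITION & SPEC =====
def Spec_match_label_to_cluster_py (label : String) (resolved : List (List (String × String))) (out : Option String) : Prop := out = match_label_to_cluster_py_alt label resolved
instance (label : String) (resolved : List (List (String × String))) (out : Option String) : Decidable (Spec_match_label_to_cluster_py label resolved out) := by unfold Spec_match_label_to_cluster_py; infer_instance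

-- ===== CLAIM (what is proved, stated in full; the proofs are below) =====
def Claim_equal_match_label_to_cluster_py : Prop := ∀ (label : String) (resolved : List (List (String × String))), Dom_match_label_to_cluster_py label resolved → Spec_match_label_to_cluster_py label resolved (match_label_to_cluster_py label resolved)

-- ===== LEMMAS AND PROOFS =====

-- invariant of B's building pass, all three components at once, over an arbitrary accumulator
theorem bFold_spec (label : String) : ∀ (rs : List (List (String × String)))
    (lm : PySem.Dict String (Option String)) (cs : PySem.Set String)
    (dm : PySem.Dict String (Option String)),
    (rs.foldl bStep (lm, cs, dm)).1.get? label = (lm.get? label).or (aLoop1 label rs)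
    ∧ (rs.foldl bStep (lm, cs, dm)).2.1.contains label
        = (cs.contains label || (aLoop2 label rs).isSome)
    ∧ (rs.foldl bStep (lm, cs, dm)).2.2.get? label = (dm.get? label).or (aLoop3 label rs) := by
  intro rs
  induction rs with
  | nil => intro lm cs dm; simp [aLoop1, aLoop2, aLoop3]
  | cons sr rest ih =>
    intro lm cs dm
    obtain ⟨i1, i2, i3⟩ := ih (bStep (lm, cs, dm) sr).1 (bStep (lm, cs, dm) sr).2.1 (bStep (lm, cs, dm) sr).2.2
    simp only [Prod.mk.eta] at i1 i2 i3
    simp only [List.foldl_cons, i1, i2, i3]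
    refine ⟨?_, ?_, ?_⟩
    · simp only [bStep]
      rcases hll : (PySem.Dict.mk sr).get? "local_label" with _ | ll
      · simp [aLoop1, hll]
      · by_cases he : ll = label
        · subst he
          by_cases hc : lm.contains ll
          · rcases hg : lm.get? ll with _ | v
            · rw [PySem.Dict.get?_eq_none_iff_contains] at hg; simp [hc] at hg
            · simp [aLoop1, hll, hc, hg]
          · have hg : lm.get? ll = none := by
              rw [PySem.Dict.get?_eq_none_iff_contains]; simpa using hc
            simp [aLoop1, hll, hc, hg, PySem.Dict.get?_insert_self]
        · have hne : ¬ ((PySem.Dict.mk sr).get? "local_label" = some label) := by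
            rw [hll]; simpa using he
          by_cases hc : lm.contains ll
          · simp [aLoop1, hll, hc, he]
          · simp [aLoop1, hll, hc, he, PySem.Dict.get?_insert, Ne.symm he]
    · simp only [bStep]
      rcases hcid : (PySem.Dict.mk sr).get? "speaker_cluster_id" with _ | c
      · simp [aLoop2, hcid]
      · by_cases he : c = label
        · subst he
          simp only [aLoop2, hcid, PySem.Set.add, PySem.Set.contains]
          by_cases h : c ∈ cs <;> simp [h]
        · simp only [aLoop2, hcid, PySem.Set.add, PySem.Set.contains]
          by_cases h : c ∈ cs <;> simp [h, he, Ne.symm he]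
    · simp only [bStep]
      rcases hdn : (PySem.Dict.mk sr).get? "display_name" with _ | dn
      · simp [aLoop3, hdn]
      · by_cases he : dn = label
        · subst he
          by_cases hc : dm.contains dn
          · rcases hg : dm.get? dn with _ | v
            · rw [PySem.Dict.get?_eq_none_iff_contains] at hg; simp [hc] at hg
            · simp [aLoop3, hdn, hc, hg]
          · have hg : dm.get? dn = none := by
              rw [PySem.Dict.get?_eq_none_iff_contains]; simpa using hc
            simp [aLoop3, hdn, hc, hg, PySem.Dict.get?_insert_self]
        · have hne : ¬ ((PySem.Dict.mk sr).get? "display_name" = some label) := by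
            rw [hdn]; simpa using he
          by_cases hc : dm.contains dn
          · simp [aLoop3, hdn, hc, he]
          · simp [aLoop3, hdn, hc, he, PySem.Dict.get?_insert, Ne.symm he]

theorem aLoop2_some (label : String) : ∀ (rs : List (List (String × String))) (x : Option String),
    aLoop2 label rs = some x → x = some label := by
  intro rs
  induction rs with
  | nil => intro x h; simp [aLoop2] at h
  | cons sr rest ih =>
    intro x h
    by_cases hc : (PySem.Dict.mk sr).get? "speaker_cluster_id" = some label
    · simp [aLoop2, hc] at h; exact h.symm
    · exact ih x (by simpa [aLoop2, hc] using h)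

-- ===== VERDICT (by name: the statement is the Claim_ definition above) =====
theorem match_label_to_cluster_py_spec : Claim_equal_match_label_to_cluster_py := by
  intro label resolved _
  unfold Spec_match_label_to_cluster_py match_label_to_cluster_py match_label_to_cluster_py_alt
  obtain ⟨h1, h2, h3⟩ := bFold_spec label resolved PySem.Dict.empty PySem.Set.empty PySem.Dict.empty
  simp only [h1, h2, h3, PySem.Dict.get?_empty, Option.none_or]
  rcases hA1 : aLoop1 label resolved with _ | r1
  · rcases hA2 : aLoop2 label resolved with _ | r2
    · rcases hA3 : aLoop3 label resolved with _ | r3 <;>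
        simp [PySem.Set.contains, PySem.Set.empty]
    · have := aLoop2_some label resolved r2 hA2
      subst this
      simp [PySem.Set.contains, PySem.Set.empty]
  · simp
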